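-- pv_equiv track=rewrite | github.com/mj-bvtc/pythonTest | photo_sorting.py | find_flags
-- ===== SOURCE A (Python) =====
-- def find_flags(search):
--     """searches for flags in list, returns results"""
--     flags = ["Crate",
--              "Pallet",
--              "Broken",
--              "Project",
--              "Color"]
--     for flag in flags:
--         if flag.upper() in search.upper():
--             return search
-- ===== SOURCE B (Python) =====
-- def find_flags(search):
--     """searches for flags in list, returns results"""
--     kws = ("CRATE", "PALLET", "BROKEN", "PROJECT", "COLOR")
--     u = search.upper()
--     for i in range(len(u)):
--         if any(u.startswith(k, i) for k in kws):
--             return search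
--     return None
-- ===== Notes on version B (the rewrite author's own statement) =====
-- stated objective: alternative
-- what changed: A runs five independent case-insensitive substring scans (one full pass per keyword); B uppercases once and makes a single left-to-right pass over the string, checking at each position whether any keyword starts there.
import Mathlib
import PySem

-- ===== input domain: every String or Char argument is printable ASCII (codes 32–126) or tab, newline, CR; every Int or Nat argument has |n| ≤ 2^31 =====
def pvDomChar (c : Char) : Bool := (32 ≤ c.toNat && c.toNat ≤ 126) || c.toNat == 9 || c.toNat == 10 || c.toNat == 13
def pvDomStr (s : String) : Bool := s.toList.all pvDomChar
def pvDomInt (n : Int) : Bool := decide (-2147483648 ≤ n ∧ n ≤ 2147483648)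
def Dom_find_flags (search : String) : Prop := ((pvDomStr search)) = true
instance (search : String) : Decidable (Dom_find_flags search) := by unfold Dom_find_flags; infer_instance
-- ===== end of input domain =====

-- B replaces A's five independent case-insensitive substring scans by one uppercase pass
-- that checks at each position whether any keyword starts there (objective: alternative).


-- ===== PORT A =====
-- A's loop 'for flag in flags: if flag.upper() in search.upper(): return search'
def find_flags_loop (search : String) : List String → Option String
  | [] => none
  | f :: rest =>
      if PySem.Str.isIn (PySem.Str.upper f) (PySem.Str.upper search) then some search
      else find_flags_loop search rest

def find_flags (search : String) : Option String :=
  find_flags_loop search ["Crate", "Pallet", "Broken", "Project", "Color"]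

-- ===== PORT B =====
def pvKws : List (List Char) :=
  ["CRATE".toList, "PALLET".toList, "BROKEN".toList, "PROJECT".toList, "COLOR".toList]

-- B's 'for i in range(len(u)): if any(u.startswith(k, i) for k in kws): return search'
-- u.startswith(k, i) is ported by hand as startswith on (u.drop i): exact for 0 <= i <= len(u),
-- the only offsets the range loop produces.
def find_flags_alt (search : String) : Option String :=
  let u := (PySem.Str.upper search).toList
  if (List.range u.length).any
      (fun i => pvKws.any (fun k => PySem.Chars.startswith (u.drop i) k)) then some search
  else none

-- ===== PRECONDITION & SPEC =====
def Spec_find_flags (search : String) (out : Option String) : Prop := out = find_flags_alt search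
instance (search : String) (out : Option String) : Decidable (Spec_find_flags search out) := by unfold Spec_find_flags; infer_instance

-- ===== CLAIM (what is proved, stated in full; the proofs are below) =====
def Claim_equal_find_flags : Prop := ∀ (search : String), Dom_find_flags search → Spec_find_flags search (find_flags search)

-- ===== LEMMAS AND PROOFS =====

-- B's position loop finds exactly the keywords that occur as substrings.
theorem pvAny_range_eq_any (u : List Char) :
    ((List.range u.length).any
        (fun i => pvKws.any (fun k => PySem.Chars.startswith (u.drop i) k)))
      = pvKws.any (fun k => PySem.Chars.isIn k u) := by
  have hne : ∀ k ∈ pvKws, k ≠ [] := by decide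
  rw [Bool.eq_iff_iff]
  simp only [List.any_eq_true, List.mem_range, PySem.Chars.startswith_iff]
  constructor
  · rintro ⟨i, _, k, hk, hp⟩
    exact ⟨k, hk, (PySem.Chars.exists_prefix_drop_iff_isIn k u).mp ⟨i, hp⟩⟩
  · rintro ⟨k, hk, hin⟩
    rcases (PySem.Chars.exists_prefix_drop_iff_isIn k u).mpr hin with ⟨j, hp⟩
    have hd : u.drop j ≠ [] := by
      intro h0
      exact hne k hk (List.prefix_nil.mp (h0 ▸ hp))
    have hj : j < u.length := by
      by_contra h
      exact hd (List.drop_eq_nil_of_le (by omega))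
    exact ⟨j, hj, k, hk, hp⟩

-- ===== VERDICT (by name: the statement is the Claim_ definition above) =====
theorem find_flags_spec : Claim_equal_find_flags := by
  intro search _
  unfold Spec_find_flags find_flags find_flags_alt
  simp only [pvAny_range_eq_any]
  have h1 : PySem.Chars.upper "Crate".toList = "CRATE".toList := by decide
  have h2 : PySem.Chars.upper "Pallet".toList = "PALLET".toList := by decide
  have h3 : PySem.Chars.upper "Broken".toList = "BROKEN".toList := by decide
  have h4 : PySem.Chars.upper "Project".toList = "PROJECT".toList := by decide
  have h5 : PySem.Chars.upper "Color".toList = "COLOR".toList := by decide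
  simp only [find_flags_loop, pvKws, List.any_cons, List.any_nil,
    PySem.Str.isIn_eq, PySem.Str.toList_upper, h1, h2, h3, h4, h5, Bool.or_false]
  split_ifs <;> simp_all
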